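-- pv_equiv track=rewrite | github.com/TheAuditorTool/project_anarchy | performance/bottlenecks.py | polynomial_complexity
-- ===== SOURCE A (Python) =====
-- def polynomial_complexity(n: int) -> int:
--     """O(n³) algorithm - polynomial time complexity."""
--     result = 0
--
--     # Triple nested loops - O(n³)
--     for i in range(n):
--         for j in range(n):
--             for k in range(n):
--                 # Even worse: another loop inside
--                 for m in range(10):
--                     result += i * j * k * m
--
--     return result
-- ===== SOURCE B (Python) =====
-- def polynomial_complexity(n: int) -> int:
--     """Closed form: sum i*j*k*m = (sum i)^3 * (sum m) = (n(n-1)/2)^3 * 45."""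
--     t = n * (n - 1) // 2 if n > 0 else 0
--     return 45 * t ** 3
-- ===== Notes on version B (the rewrite author's own statement) =====
-- stated objective: faster
-- what changed: Replaces the O(n^3) quadruple nested loop by the closed-form product of arithmetic series: 45 * (n(n-1)/2)^3.
import Mathlib
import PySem

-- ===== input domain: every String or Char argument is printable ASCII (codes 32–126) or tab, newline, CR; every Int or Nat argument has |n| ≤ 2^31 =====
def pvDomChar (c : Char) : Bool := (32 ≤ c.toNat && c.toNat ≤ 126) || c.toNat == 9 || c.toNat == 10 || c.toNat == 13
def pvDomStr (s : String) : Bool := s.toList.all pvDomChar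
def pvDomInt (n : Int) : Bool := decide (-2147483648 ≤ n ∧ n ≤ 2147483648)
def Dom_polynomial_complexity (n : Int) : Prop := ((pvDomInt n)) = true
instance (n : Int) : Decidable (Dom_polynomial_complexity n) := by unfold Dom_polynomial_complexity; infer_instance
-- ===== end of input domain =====

-- B replaces A's O(n^3) quadruple nested loop by the closed form 45 * (n(n-1)/2)^3 (faster).

-- ===== PORT A =====
def polynomial_complexity (n : Int) : Int :=
  (PySem.List.pyRange 0 n 1).foldl (fun result i =>
    (PySem.List.pyRange 0 n 1).foldl (fun result j =>
      (PySem.List.pyRange 0 n 1).foldl (fun result k =>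
        (PySem.List.pyRange 0 10 1).foldl (fun result m =>
          result + i * j * k * m) result) result) result) 0

-- ===== PORT B =====
def polynomial_complexity_alt (n : Int) : Int :=
  let t : Int := if n > 0 then PySem.Int.floordiv (n * (n - 1)) 2 else 0
  45 * t ^ 3

-- ===== PRECONDITION & SPEC =====
def Spec_polynomial_complexity (n : Int) (out : Int) : Prop := out = polynomial_complexity_alt n
instance (n : Int) (out : Int) : Decidable (Spec_polynomial_complexity n out) := by unfold Spec_polynomial_complexity; infer_instance

-- ===== CLAIM (what is proved, stated in full; the proofs are below) =====
def Claim_equal_polynomial_complexity : Prop := ∀ (n : Int), Dom_polynomial_complexity n → Spec_polynomial_complexity n (polynomial_complexity n)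

-- ===== LEMMAS AND PROOFS =====

-- triangular number n(n-1)/2 as a Nat
def pvTri (N : Nat) : Int := ((N * (N - 1) / 2 : Nat) : Int)

lemma pvTri_succ (N : Nat) : pvTri (N + 1) = pvTri N + N := by
  unfold pvTri
  have h : (N + 1) * (N + 1 - 1) / 2 = N * (N - 1) / 2 + N := by
    rcases N with _ | M
    · simp
    · have e1 : (M + 1 + 1) * (M + 1 + 1 - 1) = (M + 1) * M + 2 * (M + 1) := by
        simp only [Nat.add_sub_cancel]; ring
      have e2 : (M + 1) * (M + 1 - 1) = (M + 1) * M := by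
        simp only [Nat.add_sub_cancel]
      rw [e1, e2, Nat.add_mul_div_left _ _ (by norm_num : 0 < 2)]
  rw [h]; push_cast; ring

-- a fold adding c * x over range N sums to c * pvTri N
lemma pvFoldLinNat (c : Int) : ∀ (N : Nat) (acc : Int),
    (List.range N).foldl (fun (r : Int) (k : Nat) => r + c * (k : Int)) acc = acc + c * pvTri N := by
  intro N
  induction N with
  | zero => intro acc; simp [pvTri]
  | succ M ih =>
      intro acc
      rw [List.range_succ, List.foldl_append, ih, pvTri_succ]
      simp; ring

lemma pvFoldLin (c : Int) (n acc : Int) :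
    (PySem.List.pyRange 0 n 1).foldl (fun r x => r + c * x) acc = acc + c * pvTri n.toNat := by
  rw [PySem.List.pyRange_one, List.foldl_map]
  simp only [zero_add, Int.sub_zero]
  exact pvFoldLinNat c n.toNat acc

-- the inner constant loop: range(10) with body r + c*m adds 45*c
lemma pvFoldInner (c acc : Int) :
    (PySem.List.pyRange 0 10 1).foldl (fun r m => r + c * m) acc = acc + c * 45 := by
  have h := pvFoldLin c 10 acc
  norm_num [pvTri] at h
  convert h using 2

lemma pvLevelK (n i j acc : Int) :
    (PySem.List.pyRange 0 n 1).foldl (fun r k =>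
      (PySem.List.pyRange 0 10 1).foldl (fun r m => r + i * j * k * m) r) acc
    = acc + i * j * 45 * pvTri n.toNat := by
  have hfun : (fun (r k : Int) =>
      (PySem.List.pyRange 0 10 1).foldl (fun r m => r + i * j * k * m) r)
      = fun r k => r + (i * j * 45) * k := by
    funext r k
    rw [pvFoldInner (i * j * k) r]; ring
  rw [hfun, pvFoldLin]

lemma pvLevelJ (n i acc : Int) :
    (PySem.List.pyRange 0 n 1).foldl (fun r j =>
      (PySem.List.pyRange 0 n 1).foldl (fun r k =>
        (PySem.List.pyRange 0 10 1).foldl (fun r m => r + i * j * k * m) r) r) acc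
    = acc + i * 45 * pvTri n.toNat * pvTri n.toNat := by
  have hfun : (fun (r j : Int) =>
      (PySem.List.pyRange 0 n 1).foldl (fun r k =>
        (PySem.List.pyRange 0 10 1).foldl (fun r m => r + i * j * k * m) r) r)
      = fun r j => r + (i * 45 * pvTri n.toNat) * j := by
    funext r j
    rw [pvLevelK]; ring
  rw [hfun, pvFoldLin]

lemma pvA_closed (n : Int) :
    polynomial_complexity n = 45 * pvTri n.toNat ^ 3 := by
  unfold polynomial_complexity
  have hfun : (fun (r i : Int) =>
      (PySem.List.pyRange 0 n 1).foldl (fun r j =>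
        (PySem.List.pyRange 0 n 1).foldl (fun r k =>
          (PySem.List.pyRange 0 10 1).foldl (fun r m => r + i * j * k * m) r) r) r)
      = fun r i => r + (45 * pvTri n.toNat * pvTri n.toNat) * i := by
    funext r i
    rw [pvLevelJ]; ring
  rw [hfun, pvFoldLin]; ring

lemma pvTri_eq_floordiv (n : Int) (hn : 0 < n) :
    pvTri n.toNat = PySem.Int.floordiv (n * (n - 1)) 2 := by
  obtain ⟨N, rfl⟩ : ∃ N : Nat, n = (N : Int) := ⟨n.toNat, by omega⟩
  have hN : 1 ≤ N := by exact_mod_cast hn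
  obtain ⟨M, rfl⟩ : ∃ M, N = M + 1 := ⟨N - 1, by omega⟩
  have : ((M + 1 : Nat) : Int) * (((M + 1 : Nat) : Int) - 1) = (((M + 1) * M : Nat) : Int) := by
    push_cast; ring
  rw [this]
  have h2 : PySem.Int.floordiv (((M + 1) * M : Nat) : Int) 2 = (((M + 1) * M / 2 : Nat) : Int) := by
    exact_mod_cast PySem.Int.floordiv_natCast ((M + 1) * M) 2
  rw [h2]
  simp [pvTri]

-- ===== VERDICT (by name: the statement is the Claim_ definition above) =====
theorem polynomial_complexity_spec : Claim_equal_polynomial_complexity := by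
  intro n _
  unfold Spec_polynomial_complexity polynomial_complexity_alt
  rw [pvA_closed]
  by_cases hn : n > 0
  · simp only [hn, if_pos, pvTri_eq_floordiv n hn]
  · have : n.toNat = 0 := by omega
    rw [this]
    simp [hn, pvTri]
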